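-- pv_equiv track=rewrite | github.com/maximilianoangel/proyecto | SUKP-genetico.py | Weight
-- ===== SOURCE A (Python) =====
-- def Weight(decision, matriz, profit): # Calcula el peso de las tareas
--     i = 0
--     weight = 0
--     SubTask = []
--     while i < len(decision):
--         j = 0
--         while j < len(decision):
--             if len(SubTask) == 0 and decision[i] == 1:
--                 weight += profit[1][j]*decision[i]*matriz[i][j]
--                 SubTask.append(j)
--             elif decision[i] == 1:
--                 igual = False
--                 for index in SubTask:
--                     if index == j:
--                         igual = True
--                         break
--                 if igual == False:
--                     weight += profit[1][j]*decision[i]*matriz[i][j]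
--                     SubTask.append(j)
--             j += 1
--         i=i+1
--     return weight
-- ===== SOURCE B (Python) =====
-- def Weight(decision, matriz, profit):  # first selected row determines the whole sum
--     try:
--         i = decision.index(1)
--     except ValueError:
--         return 0
--     row = matriz[i]
--     prow = profit[1]
--     return sum(prow[j] * row[j] for j in range(len(decision)))
-- ===== Notes on version B (the rewrite author's own statement) =====
-- stated objective: faster
-- what changed: A's triple loop with a linearly scanned SubTask list collapses to: find the first index with decision 1 and take one linear dot-product of profit[1] with that row of matriz, since SubTask is saturated after the first selected row.
import Mathlib
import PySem

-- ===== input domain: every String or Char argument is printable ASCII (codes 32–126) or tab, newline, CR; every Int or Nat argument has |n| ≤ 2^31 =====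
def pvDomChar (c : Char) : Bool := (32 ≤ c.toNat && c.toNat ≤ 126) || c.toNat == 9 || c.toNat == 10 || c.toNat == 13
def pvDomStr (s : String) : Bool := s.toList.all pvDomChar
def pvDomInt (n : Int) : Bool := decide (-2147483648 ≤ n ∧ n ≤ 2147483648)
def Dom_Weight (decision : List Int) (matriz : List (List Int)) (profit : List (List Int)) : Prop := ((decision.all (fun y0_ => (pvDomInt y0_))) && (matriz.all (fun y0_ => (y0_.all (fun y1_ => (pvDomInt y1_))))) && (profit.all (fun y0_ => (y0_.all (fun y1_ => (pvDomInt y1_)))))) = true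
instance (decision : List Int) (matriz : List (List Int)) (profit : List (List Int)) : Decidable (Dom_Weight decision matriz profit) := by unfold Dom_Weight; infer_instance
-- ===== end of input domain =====

-- B replaces A's triple nested loop over a linearly scanned SubTask list by finding the first
-- index with decision == 1 and taking one linear sum over that row (objective: faster).

-- ===== PORT A =====
-- 'for index in SubTask: if index == j: igual = True; break'
def pvScan : List Int → Int → Bool
  | [], _ => false
  | x :: xs, j => if x = j then true else pvScan xs j

-- one iteration of A's inner j-loop body; state = (SubTask, weight)
def pvInnerStep (decision : List Int) (matriz : List (List Int)) (profit : List (List Int))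
    (i : Int) (st : List Int × Int) (j : Int) : List Int × Int :=
  if st.1.length = 0 ∧ PySem.List.pyGetD decision i 0 = 1 then
    (st.1 ++ [j], st.2 + PySem.List.pyGetD (PySem.List.pyGetD profit 1 []) j 0 * PySem.List.pyGetD decision i 0 * PySem.List.pyGetD (PySem.List.pyGetD matriz i []) j 0)
  else if PySem.List.pyGetD decision i 0 = 1 then
    if pvScan st.1 j = false then
      (st.1 ++ [j], st.2 + PySem.List.pyGetD (PySem.List.pyGetD profit 1 []) j 0 * PySem.List.pyGetD decision i 0 * PySem.List.pyGetD (PySem.List.pyGetD matriz i []) j 0)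
    else st
  else st

def Weight (decision : List Int) (matriz : List (List Int)) (profit : List (List Int)) : Int :=
  ((PySem.List.pyRange 0 (decision.length : Int) 1).foldl
    (fun st i => (PySem.List.pyRange 0 (decision.length : Int) 1).foldl (pvInnerStep decision matriz profit i) st)
    ([], 0)).2

-- ===== PORT B =====
def Weight_alt (decision : List Int) (matriz : List (List Int)) (profit : List (List Int)) : Int :=
  match List.findIdx? (fun d => d == 1) decision with
  | none => 0
  | some i =>
    let row := matriz.getD i []
    let prow := profit.getD 1 []
    (List.range decision.length).foldl (fun acc j => acc + prow.getD j 0 * row.getD j 0) 0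

-- ===== PRECONDITION & SPEC =====
-- Pre_ excludes exactly the inputs where Python A raises IndexError: when some decision entry is 1,
-- A reads profit[1][j] and matriz[i0][j] for all j < len(decision) at the first such index i0.
def Pre_Weight (decision : List Int) (matriz : List (List Int)) (profit : List (List Int)) : Prop :=
  (1 : Int) ∈ decision →
    (2 ≤ profit.length ∧ decision.length ≤ (profit.getD 1 []).length ∧
     decision.findIdx (fun d => d == 1) < matriz.length ∧
     decision.length ≤ (matriz.getD (decision.findIdx (fun d => d == 1)) []).length)
instance (decision : List Int) (matriz : List (List Int)) (profit : List (List Int)) : Decidable (Pre_Weight decision matriz profit) := by unfold Pre_Weight; infer_instance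

def pvWitness_Weight : List Int × List (List Int) × List (List Int) :=
  ([0, 1], [[1, 2], [3, 4]], [[5, 6], [7, 8]])

def Spec_Weight (decision : List Int) (matriz : List (List Int)) (profit : List (List Int)) (out : Int) : Prop := out = Weight_alt decision matriz profit
instance (decision : List Int) (matriz : List (List Int)) (profit : List (List Int)) (out : Int) : Decidable (Spec_Weight decision matriz profit out) := by unfold Spec_Weight; infer_instance

-- ===== CLAIM (what is proved, stated in full; the proofs are below) =====
def Claim_equal_Weight : Prop := ∀ (decision : List Int) (matriz : List (List Int)) (profit : List (List Int)), Dom_Weight decision matriz profit → Pre_Weight decision matriz profit → Spec_Weight decision matriz profit (Weight decision matriz profit)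

-- ===== LEMMAS AND PROOFS =====

-- A's per-(i,j) profit term
def pvTerm (decision : List Int) (matriz : List (List Int)) (profit : List (List Int)) (i j : Int) : Int :=
  PySem.List.pyGetD (PySem.List.pyGetD profit 1 []) j 0 * PySem.List.pyGetD decision i 0 * PySem.List.pyGetD (PySem.List.pyGetD matriz i []) j 0

theorem pvScan_iff (sub : List Int) (j : Int) : pvScan sub j = true ↔ j ∈ sub := by
  induction sub with
  | nil => simp [pvScan]
  | cons x xs ih =>
    by_cases h : x = j
    · subst h; simp [pvScan]
    · simp only [pvScan, if_neg h, ih, List.mem_cons]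
      constructor
      · exact Or.inr
      · rintro (h2 | hm)
        · exact absurd h2.symm h
        · exact hm

theorem step_skip {decision : List Int} {matriz profit : List (List Int)} {i : Int}
    (h : PySem.List.pyGetD decision i 0 ≠ 1) (st : List Int × Int) (j : Int) :
    pvInnerStep decision matriz profit i st j = st := by
  simp [pvInnerStep, h]

theorem step_char {decision : List Int} {matriz profit : List (List Int)} {i : Int}
    (h : PySem.List.pyGetD decision i 0 = 1) (st : List Int × Int) (j : Int) :
    pvInnerStep decision matriz profit i st j =
      if j ∈ st.1 then st else (st.1 ++ [j], st.2 + pvTerm decision matriz profit i j) := by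
  rcases st with ⟨sub, w⟩
  by_cases hm : j ∈ sub
  · have hne : sub ≠ [] := by intro hn; simp [hn] at hm
    have hs : pvScan sub j = true := (pvScan_iff sub j).mpr hm
    simp [pvInnerStep, h, hm, hs, List.length_eq_zero_iff, hne]
  · by_cases hnil : sub = []
    · simp [pvInnerStep, h, hnil, pvTerm]
    · have hs : pvScan sub j = false := by
        rw [Bool.eq_false_iff]
        intro ht
        exact hm ((pvScan_iff sub j).mp ht)
      simp [pvInnerStep, h, hm, hs, List.length_eq_zero_iff, hnil, pvTerm]

theorem foldl_fixed {α β : Type} (F : β → α → β) (s : β) (l : List α)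
    (h : ∀ x ∈ l, F s x = s) : l.foldl F s = s := by
  induction l with
  | nil => rfl
  | cons x xs ih =>
    rw [List.foldl_cons, h x (by simp)]
    exact ih (fun y hy => h y (by simp [hy]))

theorem inner_skip {decision : List Int} {matriz profit : List (List Int)} {i : Int}
    (h : PySem.List.pyGetD decision i 0 ≠ 1) (st : List Int × Int) (l : List Int) :
    l.foldl (pvInnerStep decision matriz profit i) st = st :=
  foldl_fixed _ _ _ (fun j _ => step_skip h st j)

theorem inner_sat {decision : List Int} {matriz profit : List (List Int)} {i : Int}
    (st : List Int × Int) (l : List Int) (h : ∀ j ∈ l, j ∈ st.1) :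
    l.foldl (pvInnerStep decision matriz profit i) st = st := by
  by_cases hd : PySem.List.pyGetD decision i 0 = 1
  · exact foldl_fixed _ _ _ (fun j hj => by rw [step_char hd]; simp [h j hj])
  · exact inner_skip hd st l

theorem inner_fill {decision : List Int} {matriz profit : List (List Int)} {i : Int}
    (hd : PySem.List.pyGetD decision i 0 = 1) :
    ∀ (l : List Int) (sub : List Int) (w : Int), l.Nodup → (∀ j ∈ l, j ∉ sub) →
    l.foldl (pvInnerStep decision matriz profit i) (sub, w) =
      (sub ++ l, w + (l.map (pvTerm decision matriz profit i)).sum) := by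
  intro l
  induction l with
  | nil => intro sub w _ _; simp
  | cons j rest ih =>
    intro sub w hnd hdisj
    rw [List.foldl_cons, step_char hd, if_neg (hdisj j (by simp))]
    rw [ih (sub ++ [j]) _ hnd.of_cons]
    · simp [add_assoc]
    · intro k hk
      simp only [List.mem_append, List.mem_singleton]
      rintro (h1 | h2)
      · exact hdisj k (by simp [hk]) h1
      · exact (List.nodup_cons.mp hnd).1 (h2 ▸ hk)

theorem pyGetD_cast_list (xs : List (List Int)) (k : Nat) :
    PySem.List.pyGetD xs (k : Int) [] = xs.getD k [] := by
  simp [PySem.List.pyGetD_natCast]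

-- main equivalence, stated without Dom (Dom is not needed)
theorem weight_eq (decision : List Int) (matriz : List (List Int)) (profit : List (List Int)) :
    Weight decision matriz profit = Weight_alt decision matriz profit := by
  rcases hf : List.findIdx? (fun d => d == 1) decision with _ | i0
  · -- no entry equals 1: A's outer loop never changes the state
    have hall : ∀ x ∈ decision, ¬ (x = 1) := by
      intro x hx
      have := (List.findIdx?_eq_none_iff.mp hf) x hx
      simpa using this
    have hnone : ∀ i ∈ PySem.List.pyRange 0 (decision.length : Int) 1,
        PySem.List.pyGetD decision i 0 ≠ 1 := by
      intro i hi
      rcases (PySem.List.mem_pyRange_one).mp hi with ⟨h0, hlt⟩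
      have hlt' : i.toNat < decision.length := by omega
      rw [PySem.List.pyGetD_eq_getElem decision 0 h0 (by exact_mod_cast hlt)]
      exact hall _ (by simp)
    unfold Weight Weight_alt
    rw [hf, foldl_fixed _ _ _ (fun i hi => inner_skip (hnone i hi) _ _)]
  · -- first selected index i0
    obtain ⟨hlt, hidx⟩ := List.findIdx?_eq_some_iff_findIdx_eq.mp hf
    have hd1 : decision[i0] = 1 := by
      have := List.findIdx_getElem (p := fun d => d == 1) (xs := decision) (w := hidx ▸ hlt)
      simpa [hidx] using this
    have hdle : PySem.List.pyGetD decision (i0 : Int) 0 = 1 := by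
      rw [PySem.List.pyGetD_eq_getElem decision 0 (by omega) (by exact_mod_cast hlt)]
      simpa using hd1
    set n := decision.length with hn
    set R := PySem.List.pyRange 0 (n : Int) 1 with hR
    set F := fun (st : List Int × Int) (i : Int) =>
        R.foldl (pvInnerStep decision matriz profit i) st with hF
    -- split the outer range at i0
    have hnat : List.range n = List.range i0 ++ i0 :: (List.range (n - i0 - 1)).map (fun k => i0 + 1 + k) := by
      have h1 : n = i0 + (1 + (n - i0 - 1)) := by omega
      conv_lhs => rw [h1]
      rw [List.range_add]
      congr 1
      rw [List.range_add, List.range_one]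
      simp [Nat.add_assoc]
    have hsplit : R = ((List.range i0).map (fun (k : Nat) => (k : Int))) ++
        ((i0 : Int) :: (((List.range (n - i0 - 1)).map (fun k => i0 + 1 + k)).map (fun (k : Nat) => (k : Int)))) := by
      rw [hR, PySem.List.pyRange_zero_nat, hnat, List.map_append, List.map_cons, List.map_map]
    -- prefix: indices before i0 have decision ≠ 1
    have hpre : ∀ i ∈ (List.range i0).map (fun (k : Nat) => (k : Int)), F ([], 0) i = ([], 0) := by
      intro i hi
      rcases List.mem_map.mp hi with ⟨k, hk, rfl⟩
      have hk' := List.mem_range.mp hk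
      have hkn : k < n := by omega
      apply inner_skip
      rw [PySem.List.pyGetD_eq_getElem decision 0 (by omega) (by exact_mod_cast hkn)]
      have hne := List.not_of_lt_findIdx (p := fun d => d == 1) (xs := decision) (i := k) (by omega)
      simp only [Int.toNat_natCast]
      simpa using hne
    -- at i0: fill
    have hfill : F ([], 0) (i0 : Int) =
        (R, (R.map (pvTerm decision matriz profit (i0 : Int))).sum) := by
      show R.foldl (pvInnerStep decision matriz profit (i0 : Int)) ([], 0) = _
      rw [inner_fill hdle R [] 0 (PySem.List.nodup_pyRange_one 0 (n : Int)) (by simp)]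
      simp
    -- suffix: state saturated
    have hsuf : ∀ i ∈ ((List.range (n - i0 - 1)).map (fun k => i0 + 1 + k)).map (fun (k : Nat) => (k : Int)),
        F (R, (R.map (pvTerm decision matriz profit (i0 : Int))).sum) i =
        (R, (R.map (pvTerm decision matriz profit (i0 : Int))).sum) := by
      intro i _
      exact inner_sat _ R (fun j hj => hj)
    have houter : (R.foldl F ([], 0)).2 = (R.map (pvTerm decision matriz profit (i0 : Int))).sum := by
      conv_lhs => rw [hsplit]
      rw [List.foldl_append, foldl_fixed _ _ _ hpre, List.foldl_cons, hfill,
        foldl_fixed _ _ _ hsuf]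
    -- compute the sum as B does
    have hterm : ∀ k < n, pvTerm decision matriz profit (i0 : Int) (k : Int) =
        (profit.getD 1 []).getD k 0 * (matriz.getD i0 []).getD k 0 := by
      intro k _
      unfold pvTerm
      rw [hdle]
      have h1 : PySem.List.pyGetD profit 1 [] = profit.getD 1 [] := by
        have := pyGetD_cast_list profit 1
        simpa using this
      have h2 : PySem.List.pyGetD matriz (i0 : Int) [] = matriz.getD i0 [] := pyGetD_cast_list matriz i0
      rw [h1, h2, PySem.List.pyGetD_natCast, PySem.List.pyGetD_natCast]
      ring
    unfold Weight Weight_alt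
    rw [hf]
    simp only
    rw [PySem.List.foldl_add (List.range decision.length)
      (fun j => (profit.getD 1 []).getD j 0 * (matriz.getD i0 []).getD j 0) 0, zero_add]
    have : (R.foldl F ([], 0)).2 = ((PySem.List.pyRange 0 (decision.length : Int) 1).foldl
        (fun st i => (PySem.List.pyRange 0 (decision.length : Int) 1).foldl (pvInnerStep decision matriz profit i) st)
        ([], 0)).2 := by rw [hR, hF, hn]
    rw [← this, houter, hR, PySem.List.pyRange_zero_nat, List.map_map]
    congr 1
    apply List.map_congr_left
    intro k hk
    exact hterm k (List.mem_range.mp hk)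

-- ===== VERDICT (by name: the statement is the Claim_ definition above) =====
theorem Weight_spec : Claim_equal_Weight := by
  intro decision matriz profit _ _
  unfold Spec_Weight
  exact weight_eq decision matriz profit
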